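-- pv_equiv track=rewrite | github.com/HugeChaos/Impossible-differentials-and-impossible-polytopic-transitions | MISTY1/New Impossible Differentials/MISTY1_model.py | s7
-- ===== SOURCE A (Python) =====
-- s7_box = [0x1b, 0x32, 0x33, 0x5a, 0x3b, 0x10, 0x17, 0x54, 0x5b, 0x1a, 0x72, 0x73, 0x6b, 0x2c, 0x66, 0x49,
--           0x1f, 0x24, 0x13, 0x6c, 0x37, 0x2e, 0x3f, 0x4a, 0x5d, 0x0f, 0x40, 0x56, 0x25, 0x51, 0x1c, 0x04,
--           0x0b, 0x46, 0x20, 0x0d, 0x7b, 0x35, 0x44, 0x42, 0x2b, 0x1e, 0x41, 0x14, 0x4b, 0x79, 0x15, 0x6f,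
--           0x0e, 0x55, 0x09, 0x36, 0x74, 0x0c, 0x67, 0x53, 0x28, 0x0a, 0x7e, 0x38, 0x02, 0x07, 0x60, 0x29,
--           0x19, 0x12, 0x65, 0x2f, 0x30, 0x39, 0x08, 0x68, 0x5f, 0x78, 0x2a, 0x4c, 0x64, 0x45, 0x75, 0x3d,
--           0x59, 0x48, 0x03, 0x57, 0x7c, 0x4f, 0x62, 0x3c, 0x1d, 0x21, 0x5e, 0x27, 0x6a, 0x70, 0x4d, 0x3a,
--           0x01, 0x6d, 0x6e, 0x63, 0x18, 0x77, 0x23, 0x05, 0x26, 0x76, 0x00, 0x31, 0x2d, 0x7a, 0x7f, 0x61,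
--           0x50, 0x22, 0x11, 0x06, 0x47, 0x16, 0x52, 0x4e, 0x71, 0x3e, 0x69, 0x43, 0x34, 0x5c, 0x58, 0x7d]
--
-- def s7(var1, var2):
--     v1 = "{}@{}@{}@{}@{}@{}@{}".format(var1[6], var1[5], var1[4], var1[3], var1[2], var1[1], var1[0])
--     v2 = "{}@{}@{}@{}@{}@{}@{}".format(var2[6], var2[5], var2[4], var2[3], var2[2], var2[1], var2[0])
--     statement1 = "0bin0011011"
--     for i in range(1, 128):
--         iv = "0bin"
--         for j in range(0, 7):
--             iv += "{}".format((i >> (6 - j)) & 0x1)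
--         siv = "0bin"
--         for j in range(0, 7):
--             siv += "{}".format((s7_box[i] >> (6 - j)) & 0x1)
--         statement1 = "(IF {} = {} THEN {} ELSE {} ENDIF)".format(v1, iv, siv, statement1)
--     statement = "ASSERT({} = {});\n".format(v2, statement1)
--     return statement
-- ===== SOURCE B (Python) =====
-- s7_box = [0x1b, 0x32, 0x33, 0x5a, 0x3b, 0x10, 0x17, 0x54, 0x5b, 0x1a, 0x72, 0x73, 0x6b, 0x2c, 0x66, 0x49,
--           0x1f, 0x24, 0x13, 0x6c, 0x37, 0x2e, 0x3f, 0x4a, 0x5d, 0x0f, 0x40, 0x56, 0x25, 0x51, 0x1c, 0x04,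
--           0x0b, 0x46, 0x20, 0x0d, 0x7b, 0x35, 0x44, 0x42, 0x2b, 0x1e, 0x41, 0x14, 0x4b, 0x79, 0x15, 0x6f,
--           0x0e, 0x55, 0x09, 0x36, 0x74, 0x0c, 0x67, 0x53, 0x28, 0x0a, 0x7e, 0x38, 0x02, 0x07, 0x60, 0x29,
--           0x19, 0x12, 0x65, 0x2f, 0x30, 0x39, 0x08, 0x68, 0x5f, 0x78, 0x2a, 0x4c, 0x64, 0x45, 0x75, 0x3d,
--           0x59, 0x48, 0x03, 0x57, 0x7c, 0x4f, 0x62, 0x3c, 0x1d, 0x21, 0x5e, 0x27, 0x6a, 0x70, 0x4d, 0x3a,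
--           0x01, 0x6d, 0x6e, 0x63, 0x18, 0x77, 0x23, 0x05, 0x26, 0x76, 0x00, 0x31, 0x2d, 0x7a, 0x7f, 0x61,
--           0x50, 0x22, 0x11, 0x06, 0x47, 0x16, 0x52, 0x4e, 0x71, 0x3e, 0x69, 0x43, 0x34, 0x5c, 0x58, 0x7d]
--
--
-- def _bits7(n):
--     return format(n, 'b').zfill(7)
--
--
-- def s7(var1, var2):
--     v1 = "@".join(str(var1[k]) for k in range(6, -1, -1))
--     v2 = "@".join(str(var2[k]) for k in range(6, -1, -1))
--     pieces = ["(IF " + v1 + " = 0bin" + _bits7(i) + " THEN 0bin" + _bits7(s7_box[i]) + " ELSE "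
--               for i in range(127, 0, -1)]
--     pieces.append("0bin0011011")
--     pieces.append(" ENDIF)" * 127)
--     return "ASSERT(" + v2 + " = " + "".join(pieces) + ");\n"
-- ===== Notes on version B (the rewrite author's own statement) =====
-- stated objective: alternative
-- what changed: B builds the nested IF string by one flat join of precomputed opening pieces (bits via format(i,'b').zfill(7)) plus the base literal and ' ENDIF)'*127, instead of A's repeated rewrapping of the growing accumulator string with per-bit inner loops; it trades A's wrap-accumulator for a pieces-list of the same overall cost.
import Mathlib
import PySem

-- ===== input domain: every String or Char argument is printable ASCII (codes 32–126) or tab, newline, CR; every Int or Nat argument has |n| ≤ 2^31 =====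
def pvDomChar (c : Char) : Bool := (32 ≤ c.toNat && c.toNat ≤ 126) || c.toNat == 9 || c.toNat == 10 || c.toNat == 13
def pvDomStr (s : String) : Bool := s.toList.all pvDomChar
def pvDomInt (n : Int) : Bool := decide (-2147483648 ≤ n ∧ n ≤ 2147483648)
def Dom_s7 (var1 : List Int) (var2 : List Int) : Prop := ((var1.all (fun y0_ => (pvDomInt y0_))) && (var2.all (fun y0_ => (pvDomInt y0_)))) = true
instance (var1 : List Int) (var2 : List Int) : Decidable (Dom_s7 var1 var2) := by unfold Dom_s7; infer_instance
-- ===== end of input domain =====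

-- B builds the statement by one flat join of opening pieces, the base literal and 127 closers,
-- instead of A's repeated rewrapping of the growing accumulator string (objective: alternative).

-- ===== PORT A =====
def s7Box : List Int := [0x1b, 0x32, 0x33, 0x5a, 0x3b, 0x10, 0x17, 0x54, 0x5b, 0x1a, 0x72, 0x73, 0x6b, 0x2c, 0x66, 0x49,
  0x1f, 0x24, 0x13, 0x6c, 0x37, 0x2e, 0x3f, 0x4a, 0x5d, 0x0f, 0x40, 0x56, 0x25, 0x51, 0x1c, 0x04,
  0x0b, 0x46, 0x20, 0x0d, 0x7b, 0x35, 0x44, 0x42, 0x2b, 0x1e, 0x41, 0x14, 0x4b, 0x79, 0x15, 0x6f,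
  0x0e, 0x55, 0x09, 0x36, 0x74, 0x0c, 0x67, 0x53, 0x28, 0x0a, 0x7e, 0x38, 0x02, 0x07, 0x60, 0x29,
  0x19, 0x12, 0x65, 0x2f, 0x30, 0x39, 0x08, 0x68, 0x5f, 0x78, 0x2a, 0x4c, 0x64, 0x45, 0x75, 0x3d,
  0x59, 0x48, 0x03, 0x57, 0x7c, 0x4f, 0x62, 0x3c, 0x1d, 0x21, 0x5e, 0x27, 0x6a, 0x70, 0x4d, 0x3a,
  0x01, 0x6d, 0x6e, 0x63, 0x18, 0x77, 0x23, 0x05, 0x26, 0x76, 0x00, 0x31, 0x2d, 0x7a, 0x7f, 0x61,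
  0x50, 0x22, 0x11, 0x06, 0x47, 0x16, 0x52, 0x4e, 0x71, 0x3e, 0x69, 0x43, 0x34, 0x5c, 0x58, 0x7d]

-- A's inner loop: iv starts as "0bin", then iv += str((i >> (6-j)) & 1) for j in range(7)
-- ((6-j).toNat is exact: j runs over 0..6; PySem.Int.band is Python's &, >>> is Python's >>)
def ivA (i : Int) : List Char :=
  (PySem.List.pyRange 0 7 1).foldl
    (fun s j => s ++ PySem.Int.toChars (PySem.Int.band (i >>> (6 - j).toNat) 1))
    ['0', 'b', 'i', 'n']

-- A's v1/v2: "{}@{}@{}@{}@{}@{}@{}".format(v[6], v[5], v[4], v[3], v[2], v[1], v[0])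
-- (indexing is in range under Pre_s7; pyGetD's default is never used there)
def fmt7A (v : List Int) : List Char :=
  PySem.Int.toChars (PySem.List.pyGetD v 6 0) ++ '@' ::
  (PySem.Int.toChars (PySem.List.pyGetD v 5 0) ++ '@' ::
  (PySem.Int.toChars (PySem.List.pyGetD v 4 0) ++ '@' ::
  (PySem.Int.toChars (PySem.List.pyGetD v 3 0) ++ '@' ::
  (PySem.Int.toChars (PySem.List.pyGetD v 2 0) ++ '@' ::
  (PySem.Int.toChars (PySem.List.pyGetD v 1 0) ++ '@' ::
  (PySem.Int.toChars (PySem.List.pyGetD v 0 0)))))))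

def s7 (var1 : List Int) (var2 : List Int) : String :=
  let v1 := fmt7A var1
  let v2 := fmt7A var2
  let statement1 :=
    (PySem.List.pyRange 1 128 1).foldl
      (fun st i =>
        ['(', 'I', 'F', ' '] ++ v1 ++ [' ', '=', ' '] ++ ivA i ++
          [' ', 'T', 'H', 'E', 'N', ' '] ++ ivA (PySem.List.pyGetD s7Box i 0) ++
          [' ', 'E', 'L', 'S', 'E', ' '] ++ st ++ [' ', 'E', 'N', 'D', 'I', 'F', ')'])
      ['0', 'b', 'i', 'n', '0', '0', '1', '1', '0', '1', '1']
  String.ofList ("ASSERT(".toList ++ v2 ++ [' ', '=', ' '] ++ statement1 ++ [')', ';', '\n'])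

-- ===== PORT B =====
-- B's _bits7(n) = format(n, 'b').zfill(7)
def bits7 (n : Int) : List Char := PySem.Chars.zfill (PySem.Int.toBinChars n) 7

-- B's v1/v2: "@".join(str(v[k]) for k in range(6, -1, -1))
-- (indexing is in range under Pre_s7; pyGetD's default is never used there)
def fmt7B (v : List Int) : List Char :=
  PySem.Chars.join ['@']
    ((PySem.List.pyRange 6 (-1) (-1)).map (fun k => PySem.Int.toChars (PySem.List.pyGetD v k 0)))

def s7_alt (var1 : List Int) (var2 : List Int) : String :=
  let v1 := fmt7B var1
  let v2 := fmt7B var2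
  let pieces :=
    (PySem.List.pyRange 127 0 (-1)).map
      (fun i =>
        ['(', 'I', 'F', ' '] ++ v1 ++ [' ', '=', ' ', '0', 'b', 'i', 'n'] ++ bits7 i ++
          [' ', 'T', 'H', 'E', 'N', ' ', '0', 'b', 'i', 'n'] ++
          bits7 (PySem.List.pyGetD s7Box i 0) ++ [' ', 'E', 'L', 'S', 'E', ' '])
  let allPieces := pieces ++ [['0', 'b', 'i', 'n', '0', '0', '1', '1', '0', '1', '1'],
    (List.replicate 127 [' ', 'E', 'N', 'D', 'I', 'F', ')']).flatten]
  String.ofList ("ASSERT(".toList ++ v2 ++ [' ', '=', ' '] ++ allPieces.flatten ++ [')', ';', '\n'])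

-- ===== PRECONDITION & SPEC =====
-- Pre_ excludes exactly the inputs on which A raises IndexError (a list with fewer than 7 entries).
def Pre_s7 (var1 : List Int) (var2 : List Int) : Prop := 7 ≤ var1.length ∧ 7 ≤ var2.length
instance (var1 : List Int) (var2 : List Int) : Decidable (Pre_s7 var1 var2) := by unfold Pre_s7; infer_instance
def pvWitness_s7 : List Int × List Int := ([0, 1, 2, 3, 4, 5, 6], [6, 5, 4, 3, 2, 1, 0])

def Spec_s7 (var1 : List Int) (var2 : List Int) (out : String) : Prop := out = s7_alt var1 var2
instance (var1 : List Int) (var2 : List Int) (out : String) : Decidable (Spec_s7 var1 var2 out) := by unfold Spec_s7; infer_instance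

-- ===== CLAIM (what is proved, stated in full; the proofs are below) =====
def Claim_equal_s7 : Prop := ∀ (var1 : List Int) (var2 : List Int), Dom_s7 var1 var2 → Pre_s7 var1 var2 → Spec_s7 var1 var2 (s7 var1 var2)

-- ===== LEMMAS AND PROOFS =====

-- the two formattings agree (both read the same seven positions, in the same order)
lemma fmt7_eq (v : List Int) : fmt7A v = fmt7B v := by
  simp [fmt7A, fmt7B,
    (by decide : PySem.List.pyRange 6 (-1) (-1) = [(6 : Int), 5, 4, 3, 2, 1, 0]),
    PySem.Chars.join, List.intercalate, List.intersperse]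

-- A's per-i bit strings coincide with B's zero-filled binary strings on 1..127 and the box entries
set_option maxRecDepth 40000 in
lemma iv_eq_bits7 : ∀ i ∈ PySem.List.pyRange 1 128 1,
    ivA i = ['0', 'b', 'i', 'n'] ++ bits7 i ∧
    ivA (PySem.List.pyGetD s7Box i 0) = ['0', 'b', 'i', 'n'] ++ bits7 (PySem.List.pyGetD s7Box i 0) := by
  decide

-- appending one more closer commutes with the block of existing closers
lemma rep_comm (c : List Char) (n : Nat) :
    c ++ (List.replicate n c).flatten = (List.replicate n c).flatten ++ c := by
  induction n with
  | zero => simp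
  | succ n ih =>
    simp only [List.replicate_succ, List.flatten_cons]
    rw [ih, ← List.append_assoc, ih]

-- generic shape: repeated wrapping = flat concatenation of openers, base, and closers
lemma foldl_wrap (p : Int → List Char) (c : List Char) :
    ∀ (l : List Int) (base : List Char),
      l.foldl (fun st i => p i ++ st ++ c) base
        = (l.reverse.map p).flatten ++ base ++ (List.replicate l.length c).flatten := by
  intro l
  induction l with
  | nil => intro base; simp
  | cons a l ih =>
    intro base
    rw [List.foldl_cons, ih]
    simp [List.replicate_succ', List.flatten_append, List.append_assoc, rep_comm]

-- the two statement bodies agree, for any v1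
set_option maxRecDepth 40000 in
lemma stmt_eq (v1 : List Char) :
    (PySem.List.pyRange 1 128 1).foldl
      (fun st i =>
        ['(', 'I', 'F', ' '] ++ v1 ++ [' ', '=', ' '] ++ ivA i ++
          [' ', 'T', 'H', 'E', 'N', ' '] ++ ivA (PySem.List.pyGetD s7Box i 0) ++
          [' ', 'E', 'L', 'S', 'E', ' '] ++ st ++ [' ', 'E', 'N', 'D', 'I', 'F', ')'])
      ['0', 'b', 'i', 'n', '0', '0', '1', '1', '0', '1', '1']
    = ((PySem.List.pyRange 127 0 (-1)).map
        (fun i =>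
          ['(', 'I', 'F', ' '] ++ v1 ++ [' ', '=', ' ', '0', 'b', 'i', 'n'] ++ bits7 i ++
            [' ', 'T', 'H', 'E', 'N', ' ', '0', 'b', 'i', 'n'] ++
            bits7 (PySem.List.pyGetD s7Box i 0) ++ [' ', 'E', 'L', 'S', 'E', ' ']) ++
       [['0', 'b', 'i', 'n', '0', '0', '1', '1', '0', '1', '1'],
        (List.replicate 127 [' ', 'E', 'N', 'D', 'I', 'F', ')']).flatten]).flatten := by
  have hcongr :
      (PySem.List.pyRange 1 128 1).foldl
        (fun st i =>
          ['(', 'I', 'F', ' '] ++ v1 ++ [' ', '=', ' '] ++ ivA i ++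
            [' ', 'T', 'H', 'E', 'N', ' '] ++ ivA (PySem.List.pyGetD s7Box i 0) ++
            [' ', 'E', 'L', 'S', 'E', ' '] ++ st ++ [' ', 'E', 'N', 'D', 'I', 'F', ')'])
        ['0', 'b', 'i', 'n', '0', '0', '1', '1', '0', '1', '1']
      = (PySem.List.pyRange 1 128 1).foldl
        (fun st i =>
          (['(', 'I', 'F', ' '] ++ v1 ++ [' ', '=', ' ', '0', 'b', 'i', 'n'] ++ bits7 i ++
            [' ', 'T', 'H', 'E', 'N', ' ', '0', 'b', 'i', 'n'] ++
            bits7 (PySem.List.pyGetD s7Box i 0) ++ [' ', 'E', 'L', 'S', 'E', ' ']) ++ st ++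
            [' ', 'E', 'N', 'D', 'I', 'F', ')'])
        ['0', 'b', 'i', 'n', '0', '0', '1', '1', '0', '1', '1'] := by
    apply PySem.List.foldl_congr_mem
    intro st i hi
    obtain ⟨hiv, hsiv⟩ := iv_eq_bits7 i hi
    rw [hiv, hsiv]
    simp [List.append_assoc]
  have hrev : PySem.List.pyRange 127 0 (-1) = (PySem.List.pyRange 1 128 1).reverse := by decide
  have hlen : (PySem.List.pyRange 1 128 1).length = 127 := by decide
  rw [hcongr,
    foldl_wrap
      (fun i =>
        ['(', 'I', 'F', ' '] ++ v1 ++ [' ', '=', ' ', '0', 'b', 'i', 'n'] ++ bits7 i ++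
          [' ', 'T', 'H', 'E', 'N', ' ', '0', 'b', 'i', 'n'] ++
          bits7 (PySem.List.pyGetD s7Box i 0) ++ [' ', 'E', 'L', 'S', 'E', ' '])
      [' ', 'E', 'N', 'D', 'I', 'F', ')'] (PySem.List.pyRange 1 128 1)
      ['0', 'b', 'i', 'n', '0', '0', '1', '1', '0', '1', '1'],
    hlen, hrev]
  simp [List.flatten_append, List.append_assoc]

-- ===== VERDICT (by name: the statement is the Claim_ definition above) =====
theorem s7_spec : Claim_equal_s7 := by
  intro var1 var2 _ _
  unfold Spec_s7
  show s7 var1 var2 = s7_alt var1 var2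
  simp only [s7, s7_alt]
  rw [fmt7_eq var1, fmt7_eq var2, stmt_eq (fmt7B var1)]
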